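-- pv_equiv track=rewrite | github.com/KatherineMarakhova/guu_schedule_bot | src/funcs.py | get_indexes_of_next_napr
-- ===== SOURCE A (Python) =====
-- def get_indexes_of_next_napr(dict_of_napr, name_napr):
--      # возвращает индекс следующего элемента, а если такового нет, то индекс самого себя
--      find = False
--      for key in dict_of_napr:
--           if key == name_napr:
--                find = True
--                continue
--           if find == True:
--                return dict_of_napr[key]
--      return dict_of_napr[name_napr]
-- ===== SOURCE B (Python) =====
-- def get_indexes_of_next_napr(dict_of_napr, name_napr):
--     # Build a successor map once (each key -> the key after it), then answer by hash lookup.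
--     # For the last key (no successor) succ.get falls back to the key itself; for an absent
--     # key the final subscript raises KeyError exactly like the original.
--     keys = list(dict_of_napr)
--     succ = dict(zip(keys, keys[1:]))
--     return dict_of_napr[succ.get(name_napr, name_napr)]
-- ===== Notes on version B (the rewrite author's own statement) =====
-- stated objective: alternative
-- what changed: Replaces A's stateful found-flag scan with a precomputed successor dictionary (key -> next key) so the answer is obtained by two hash lookups instead of a conditional traversal.
import Mathlib
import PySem

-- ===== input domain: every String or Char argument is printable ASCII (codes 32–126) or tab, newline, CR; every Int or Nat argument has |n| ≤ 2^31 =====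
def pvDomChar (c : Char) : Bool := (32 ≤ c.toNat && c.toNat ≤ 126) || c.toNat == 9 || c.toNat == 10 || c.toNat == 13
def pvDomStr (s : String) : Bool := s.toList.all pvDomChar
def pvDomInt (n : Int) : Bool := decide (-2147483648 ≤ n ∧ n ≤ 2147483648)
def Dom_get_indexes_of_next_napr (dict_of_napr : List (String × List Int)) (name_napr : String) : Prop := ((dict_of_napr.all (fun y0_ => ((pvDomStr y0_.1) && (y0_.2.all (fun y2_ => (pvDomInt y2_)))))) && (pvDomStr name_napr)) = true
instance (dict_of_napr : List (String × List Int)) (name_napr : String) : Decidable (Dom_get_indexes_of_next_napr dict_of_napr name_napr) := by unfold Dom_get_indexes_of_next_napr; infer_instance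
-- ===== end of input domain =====

-- ===== PORT A =====
-- B replaces A's stateful found-flag scan with a precomputed successor dictionary (key -> next key),
-- answering by two dictionary lookups (objective: alternative).
-- loop of A: iterate keys with a 'find' flag
def pvGoA (d : List (String × List Int)) (n : String) : List (String × List Int) → Bool → List Int
  | [], _ => PySem.Dict.getD (PySem.Dict.mk d) n []
  | (k, _) :: rest, find =>
    if k = n then pvGoA d n rest true
    else if find then PySem.Dict.getD (PySem.Dict.mk d) k []
    else pvGoA d n rest find

def get_indexes_of_next_napr (dict_of_napr : List (String × List Int)) (name_napr : String) : List Int :=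
  pvGoA dict_of_napr name_napr dict_of_napr false

-- ===== PORT B =====
-- succ = dict(zip(keys, keys[1:])); return dict_of_napr[succ.get(name_napr, name_napr)]
def get_indexes_of_next_napr_alt (dict_of_napr : List (String × List Int)) (name_napr : String) : List Int :=
  let keys := dict_of_napr.map Prod.fst
  let succ := PySem.Dict.ofList (keys.zip keys.tail)
  PySem.Dict.getD (PySem.Dict.mk dict_of_napr) (PySem.Dict.getD succ name_napr name_napr) []

-- ===== PRECONDITION & SPEC =====
-- Pre_ excludes inputs where A raises KeyError (name_napr not a key) and assoc lists with
-- duplicate keys, which do not represent any Python dict (dict keys are distinct).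
def Pre_get_indexes_of_next_napr (dict_of_napr : List (String × List Int)) (name_napr : String) : Prop :=
  name_napr ∈ dict_of_napr.map Prod.fst ∧ (dict_of_napr.map Prod.fst).Nodup
instance (dict_of_napr : List (String × List Int)) (name_napr : String) : Decidable (Pre_get_indexes_of_next_napr dict_of_napr name_napr) := by unfold Pre_get_indexes_of_next_napr; infer_instance

def pvWitness_get_indexes_of_next_napr : (List (String × List Int)) × String :=
  ([("a", [1, 2]), ("b", [3])], "a")

def Spec_get_indexes_of_next_napr (dict_of_napr : List (String × List Int)) (name_napr : String) (out : List Int) : Prop := out = get_indexes_of_next_napr_alt dict_of_napr name_napr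
instance (dict_of_napr : List (String × List Int)) (name_napr : String) (out : List Int) : Decidable (Spec_get_indexes_of_next_napr dict_of_napr name_napr out) := by unfold Spec_get_indexes_of_next_napr; infer_instance

-- ===== CLAIM (what is proved, stated in full; the proofs are below) =====
def Claim_equal_get_indexes_of_next_napr : Prop := ∀ (dict_of_napr : List (String × List Int)) (name_napr : String), Dom_get_indexes_of_next_napr dict_of_napr name_napr → Pre_get_indexes_of_next_napr dict_of_napr name_napr → Spec_get_indexes_of_next_napr dict_of_napr name_napr (get_indexes_of_next_napr dict_of_napr name_napr)

-- ===== LEMMAS AND PROOFS =====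
-- an update at keys avoiding x leaves the lookup at x unchanged
theorem update_get?_not_mem (ps : List (String × String)) (d : PySem.Dict String String)
    (x : String) (h : x ∉ ps.map Prod.fst) :
    (d.update ps).get? x = d.get? x := by
  induction ps generalizing d with
  | nil => rfl
  | cons p rest ih =>
    simp only [List.map, List.mem_cons, not_or] at h
    have : (d.update (p :: rest)) = ((d.insert p.1 p.2).update rest) := rfl
    rw [this, ih _ h.2, PySem.Dict.get?_insert_of_ne _ _ h.1]

-- the lookup in d.update ps at a key occurring in ps does not depend on the base d
theorem update_get?_mem (ps : List (String × String)) (d : PySem.Dict String String)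
    (x : String) (h : x ∈ ps.map Prod.fst) :
    (d.update ps).get? x = (PySem.Dict.ofList ps).get? x := by
  induction ps generalizing d with
  | nil => simp at h
  | cons p rest ih =>
    have hd : (d.update (p :: rest)) = ((d.insert p.1 p.2).update rest) := rfl
    have he : (PySem.Dict.ofList (p :: rest)) = ((PySem.Dict.empty.insert p.1 p.2).update rest) := rfl
    by_cases hm : x ∈ rest.map Prod.fst
    · rw [hd, he, ih (d.insert p.1 p.2) hm, ih (PySem.Dict.empty.insert p.1 p.2) hm]
    · simp only [List.map, List.mem_cons] at h
      have hx : x = p.1 := h.resolve_right hm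
      rw [hd, he, update_get?_not_mem _ _ _ hm, update_get?_not_mem _ _ _ hm, hx,
        PySem.Dict.get?_insert_self, PySem.Dict.get?_insert_self]

-- successor-dict lookup, cons with a different head key
theorem ofList_get?_cons_ne (k v : String) (ps : List (String × String)) (n : String)
    (h : n ≠ k) : (PySem.Dict.ofList ((k, v) :: ps)).get? n = (PySem.Dict.ofList ps).get? n := by
  have he : (PySem.Dict.ofList ((k, v) :: ps)) = ((PySem.Dict.empty.insert k v).update ps) := rfl
  by_cases hm : n ∈ ps.map Prod.fst
  · rw [he, update_get?_mem _ _ _ hm]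
  · rw [he, update_get?_not_mem _ _ _ hm, PySem.Dict.get?_insert_of_ne _ _ h,
      show (PySem.Dict.ofList ps) = PySem.Dict.empty.update ps from rfl,
      update_get?_not_mem _ _ _ hm]

-- successor-dict lookup, head key hit and no later occurrence
theorem ofList_get?_cons_self (n v : String) (ps : List (String × String))
    (h : n ∉ ps.map Prod.fst) : (PySem.Dict.ofList ((n, v) :: ps)).get? n = some v := by
  have he : (PySem.Dict.ofList ((n, v) :: ps)) = ((PySem.Dict.empty.insert n v).update ps) := rfl
  rw [he, update_get?_not_mem _ _ _ h, PySem.Dict.get?_insert_self]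

-- with find = true and n not among the keys of l, A returns the head key's value (or own value if empty)
theorem pvGoA_true (d : List (String × List Int)) (n : String) (l : List (String × List Int))
    (h : n ∉ l.map Prod.fst) :
    pvGoA d n l true = match l with
      | [] => PySem.Dict.getD (PySem.Dict.mk d) n []
      | (k, _) :: _ => PySem.Dict.getD (PySem.Dict.mk d) k [] := by
  cases l with
  | nil => rfl
  | cons x rest =>
    obtain ⟨k, v⟩ := x
    simp only [List.map, List.mem_cons, not_or] at h
    have hk : ¬ k = n := fun hh => h.1 hh.symm
    simp [pvGoA, hk]

-- main invariant: on any suffix with distinct keys A's flagged scan equals B's successor-dict lookup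
theorem pvGo_eq (d : List (String × List Int)) (n : String) :
    ∀ (l : List (String × List Int)), (l.map Prod.fst).Nodup →
      pvGoA d n l false =
        PySem.Dict.getD (PySem.Dict.mk d)
          (PySem.Dict.getD (PySem.Dict.ofList ((l.map Prod.fst).zip (l.map Prod.fst).tail)) n n) [] := by
  intro l
  induction l with
  | nil => intro _; rfl
  | cons x rest ih =>
    obtain ⟨k, v⟩ := x
    intro hnd
    simp only [List.map, List.nodup_cons] at hnd
    cases rest with
    | nil =>
      by_cases hk : k = n <;> simp [pvGoA, hk, PySem.Dict.ofList, PySem.Dict.update]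
    | cons y t =>
      obtain ⟨k2, v2⟩ := y
      have hzip : ((((k, v) :: (k2, v2) :: t).map Prod.fst).zip (((k, v) :: (k2, v2) :: t).map Prod.fst).tail)
          = (k, k2) :: ((((k2, v2) :: t).map Prod.fst).zip (((k2, v2) :: t).map Prod.fst).tail) := rfl
      by_cases hk : k = n
      · subst hk
        have hk2 : k ∉ ((k2, v2) :: t).map Prod.fst := hnd.1
        have hA : pvGoA d k ((k, v) :: (k2, v2) :: t) false = pvGoA d k ((k2, v2) :: t) true := by
          simp [pvGoA]
        have hz : k ∉ ((((k2, v2) :: t).map Prod.fst).zip (((k2, v2) :: t).map Prod.fst).tail).map Prod.fst := by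
          intro hmem
          obtain ⟨⟨p, q⟩, hpq, hfst⟩ := List.mem_map.mp hmem
          exact hk2 (hfst ▸ (List.of_mem_zip hpq).1)
        have hsucc : (PySem.Dict.ofList ((k, k2) ::
            ((((k2, v2) :: t).map Prod.fst).zip (((k2, v2) :: t).map Prod.fst).tail))).getD k k = k2 := by
          rw [PySem.Dict.getD_eq_get?_getD, ofList_get?_cons_self _ _ _ hz]
          rfl
        rw [hA, pvGoA_true d k _ hk2, hzip, hsucc]
      · have hA : pvGoA d n ((k, v) :: (k2, v2) :: t) false = pvGoA d n ((k2, v2) :: t) false := by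
          simp [pvGoA, hk]
        have hsucc : (PySem.Dict.ofList ((k, k2) ::
            ((((k2, v2) :: t).map Prod.fst).zip (((k2, v2) :: t).map Prod.fst).tail))).getD n n =
            (PySem.Dict.ofList ((((k2, v2) :: t).map Prod.fst).zip (((k2, v2) :: t).map Prod.fst).tail)).getD n n := by
          rw [PySem.Dict.getD_eq_get?_getD, ofList_get?_cons_ne _ _ _ _ (fun hh => hk hh.symm),
            ← PySem.Dict.getD_eq_get?_getD]
        rw [hA, ih hnd.2, hzip, hsucc]

-- ===== VERDICT (by name: the statement is the Claim_ definition above) =====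
theorem get_indexes_of_next_napr_spec : Claim_equal_get_indexes_of_next_napr := by
  intro d n _ hpre
  unfold Spec_get_indexes_of_next_napr get_indexes_of_next_napr get_indexes_of_next_napr_alt
  exact pvGo_eq d n d hpre.2
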